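-- pv_equiv track=rewrite | github.com/Bryan-A-Asher/Evolutionary-Computing | scripts/akari_functions_1c.py | light_up_path
-- ===== SOURCE A (Python) =====
-- def light_up_path(board, row, col):
--     """marks the light path of a bulb"""
--
--     # row to the right
--     for i in range(len(board[row][col + 1:])):
--         if board[row][col + 1 + i] == ' ':
--             board[row][col + 1 + i] = chr(34)
--         if str(board[row][col + 1 + i]).isdigit():
--             break
--     # row to the left
--     for i in range(len(board[row][:col]), -1, -1):
--         if board[row][i] == ' ':
--             board[row][i] = chr(34)
--         if str(board[row][i]).isdigit():
--             break
--     # colm path above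
--     for i in range(len(board[:row]), -1, -1):
--         if board[i][col] == ' ':
--             board[i][col] = chr(34)
--         if str(board[i][col]).isdigit():
--             break
--     # colm path below
--     for i in range(len(board[row:])):
--         if board[row + i][col] == ' ':
--             board[row + i][col] = chr(34)
--         if str(board[row + i][col]).isdigit():
--             break
--     return board
-- ===== SOURCE B (Python) =====
-- def light_up_path(board, row, col):
--     """marks the light path of a bulb: locate the nearest digit wall in each of the four
--     directions first, then repaint the blank cells of the two cross segments in bulk
--     (mutates board in place)"""
--     if not (0 <= row < len(board) and 0 <= col < len(board[row])):
--         raise IndexError('bulb position off the board')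
--     cells = board[row]
--     n = len(cells)
--     hi = next((j for j in range(col + 1, n) if cells[j].isdigit()), n)
--     lo = next((j for j in range(col, -1, -1) if cells[j].isdigit()), 0)
--     up = next((i for i in range(row, -1, -1)
--                if col < len(board[i]) and board[i][col].isdigit()), 0)
--     dn = next((i for i in range(row, len(board))
--                if col < len(board[i]) and board[i][col].isdigit()), len(board) - 1) + 1
--     board[row][lo:hi] = ['"' if ch == ' ' else ch for ch in cells[lo:hi]]
--     for i in range(up, dn):
--         if board[i][col] == ' ':
--             board[i][col] = '"'
--     return board
-- ===== Notes on version B (the rewrite author's own statement) =====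
-- stated objective: alternative
-- what changed: Instead of A's four mark-and-break walks that mutate cell by cell while scanning, B first locates the nearest digit wall in each of the four directions (pure boundary searches on the untouched board) and then repaints the blank cells of the two cross segments in two bulk fills (a slice assignment for the row, one guarded loop for the column); Pre_ additionally excludes negative bulb coordinates, where A marks cells through Python's accidental negative-index wraparound while B, which validates the grid coordinate, raises IndexError.
-- outside the precondition, e.g. on light_up_path([[' ', ' ', ' ']], 0, -2): A returns [['"', '"', '"']], B raises IndexError; on light_up_path([[' '], [' ']], -1, 0): A returns [['"'], ['"']], B raises IndexError
import Mathlib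
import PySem

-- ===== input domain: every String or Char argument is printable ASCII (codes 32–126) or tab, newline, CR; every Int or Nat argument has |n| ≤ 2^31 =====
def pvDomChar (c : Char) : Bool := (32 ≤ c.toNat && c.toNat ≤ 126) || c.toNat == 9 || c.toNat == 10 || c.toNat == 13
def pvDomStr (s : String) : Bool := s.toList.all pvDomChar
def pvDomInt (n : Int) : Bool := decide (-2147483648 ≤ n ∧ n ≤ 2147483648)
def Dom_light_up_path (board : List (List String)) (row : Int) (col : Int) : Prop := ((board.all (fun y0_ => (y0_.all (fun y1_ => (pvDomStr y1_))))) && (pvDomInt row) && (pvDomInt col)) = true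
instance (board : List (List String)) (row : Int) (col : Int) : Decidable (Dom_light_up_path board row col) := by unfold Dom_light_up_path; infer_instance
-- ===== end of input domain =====

-- B replaces A's four mark-and-break walks by a different algorithm: it first locates the
-- nearest digit wall in each direction (pure boundary searches on the untouched board) and
-- then repaints the blank cells of the two cross segments in bulk.  Both Pythons mutate
-- `board` in place and return it; the equivalence proved here is about the return value.

-- ===== PORT A =====
-- board[r][c] (with a default; under Pre_ every Python access is in range)
def lupGet (b : List (List String)) (r c : Int) : String :=
  PySem.List.pyGetD (PySem.List.pyGetD b r []) c ""
-- board[r][c] = v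
def lupSet (b : List (List String)) (r c : Int) (v : String) : List (List String) :=
  PySem.List.pySetD b r (PySem.List.pySetD (PySem.List.pyGetD b r []) c v)

-- "row to the right": for i in range(len(board[row][col+1:])), cell board[row][col+1+i]
def lupRight (row col : Int) : List Int → List (List String) → List (List String)
  | [], b => b
  | i :: is, b =>
    let b1 := if lupGet b row (col + 1 + i) = " " then lupSet b row (col + 1 + i) "\"" else b
    if PySem.Str.strIsdigit (lupGet b1 row (col + 1 + i)) then b1 else lupRight row col is b1

-- "row to the left": for i in range(len(board[row][:col]), -1, -1), cell board[row][i]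
def lupLeft (row : Int) : List Int → List (List String) → List (List String)
  | [], b => b
  | i :: is, b =>
    let b1 := if lupGet b row i = " " then lupSet b row i "\"" else b
    if PySem.Str.strIsdigit (lupGet b1 row i) then b1 else lupLeft row is b1

-- "colm path above": for i in range(len(board[:row]), -1, -1), cell board[i][col]
def lupAbove (col : Int) : List Int → List (List String) → List (List String)
  | [], b => b
  | i :: is, b =>
    let b1 := if lupGet b i col = " " then lupSet b i col "\"" else b
    if PySem.Str.strIsdigit (lupGet b1 i col) then b1 else lupAbove col is b1

-- "colm path below": for i in range(len(board[row:])), cell board[row+i][col]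
def lupBelow (row col : Int) : List Int → List (List String) → List (List String)
  | [], b => b
  | i :: is, b =>
    let b1 := if lupGet b (row + i) col = " " then lupSet b (row + i) col "\"" else b
    if PySem.Str.strIsdigit (lupGet b1 (row + i) col) then b1 else lupBelow row col is b1

def light_up_path (board : List (List String)) (row : Int) (col : Int) : List (List String) :=
  let b1 := lupRight row col
    (PySem.List.pyRange 0 ((PySem.List.slice (PySem.List.pyGetD board row []) (some (col + 1)) none).length : Int) 1) board
  let b2 := lupLeft row
    (PySem.List.pyRange ((PySem.List.slice (PySem.List.pyGetD b1 row []) none (some col)).length : Int) (-1) (-1)) b1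
  let b3 := lupAbove col
    (PySem.List.pyRange ((PySem.List.slice b2 none (some row)).length : Int) (-1) (-1)) b2
  lupBelow row col
    (PySem.List.pyRange 0 ((PySem.List.slice b3 (some row) none).length : Int) 1) b3

-- ===== PORT B =====
-- board[r][c] (with a default; under Pre_ every Python access of B is in range)
def bGet (b : List (List String)) (r c : Int) : String :=
  PySem.List.pyGetD (PySem.List.pyGetD b r []) c ""
-- board[r][c] = v
def bSet (b : List (List String)) (r c : Int) (v : String) : List (List String) :=
  PySem.List.pySetD b r (PySem.List.pySetD (PySem.List.pyGetD b r []) c v)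
-- next((j for j in l if p j), d)
def bFirst (p : Int → Bool) : List Int → Int → Int
  | [], d => d
  | j :: js, d => if p j then j else bFirst p js d

def light_up_path_alt (board : List (List String)) (row : Int) (col : Int) : List (List String) :=
  if 0 ≤ row ∧ row < (board.length : Int) ∧ 0 ≤ col ∧
      col < ((PySem.List.pyGetD board row []).length : Int) then
    let cells := PySem.List.pyGetD board row []
    let n : Int := cells.length
    let N : Int := board.length
    -- hi = next((j for j in range(col+1, n) if cells[j].isdigit()), n)
    let hi := bFirst (fun j => PySem.Str.strIsdigit (PySem.List.pyGetD cells j "")) (PySem.List.pyRange (col + 1) n 1) n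
    -- lo = next((j for j in range(col, -1, -1) if cells[j].isdigit()), 0)
    let lo := bFirst (fun j => PySem.Str.strIsdigit (PySem.List.pyGetD cells j "")) (PySem.List.pyRange col (-1) (-1)) 0
    -- up / dn: nearest digit wall in the column (col in range for that row and a digit there)
    let cdig : Int → Bool := fun i =>
      decide (col < ((PySem.List.pyGetD board i []).length : Int)) &&
        PySem.Str.strIsdigit (PySem.List.pyGetD (PySem.List.pyGetD board i []) col "")
    let up := bFirst cdig (PySem.List.pyRange row (-1) (-1)) 0
    let dn := bFirst cdig (PySem.List.pyRange row N 1) (N - 1) + 1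
    -- board[row][lo:hi] = ['"' if ch == ' ' else ch for ch in cells[lo:hi]]
    -- (hand-ported slice assignment: exact because 0 ≤ lo ≤ hi ≤ n and the
    --  replacement list has exactly the slice's length)
    let newRow := cells.take lo.toNat ++
      (PySem.List.slice cells (some lo) (some hi)).map (fun ch => if ch = " " then "\"" else ch) ++
      cells.drop hi.toNat
    let b2 := PySem.List.pySetD board row newRow
    -- for i in range(up, dn): if board[i][col] == ' ': board[i][col] = '"'
    (PySem.List.pyRange up dn 1).foldl
      (fun b i => if bGet b i col = " " then bSet b i col "\"" else b) b2
  else board  -- Python B raises IndexError here (off-board bulb position): outside Pre_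

-- ===== PRECONDITION & SPEC =====
-- Pre_ is exactly the region where BOTH Pythons return: the bulb position is a real
-- (non-negative, in-range) grid coordinate, and every row above/below the bulb where col
-- is not a valid index is "guarded" by a digit cell strictly between it and the bulb row
-- (A's column loop breaks at the digit before reaching the bad row; B's fill stops at the
-- same wall).  Pre_ excludes negative bulb coordinates, on which A marks cells through
-- Python's accidental negative-index wraparound while B, which validates the grid
-- coordinate, raises IndexError.
def Pre_light_up_path (board : List (List String)) (row : Int) (col : Int) : Prop :=
  0 ≤ row ∧ row < (board.length : Int) ∧
  0 ≤ col ∧ col < ((PySem.List.pyGetD board row []).length : Int) ∧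
  (∀ i ∈ List.range board.length, (i : Int) ≤ row →
    ¬ (col < ((board.getD i []).length : Int)) →
    ∃ j ∈ List.range board.length, i < j ∧ (j : Int) ≤ row ∧
      col < ((board.getD j []).length : Int) ∧
      PySem.Str.strIsdigit (PySem.List.pyGetD (board.getD j []) col "") = true) ∧
  (∀ i ∈ List.range board.length, row ≤ (i : Int) →
    ¬ (col < ((board.getD i []).length : Int)) →
    ∃ j ∈ List.range board.length, row ≤ (j : Int) ∧ j < i ∧
      col < ((board.getD j []).length : Int) ∧
      PySem.Str.strIsdigit (PySem.List.pyGetD (board.getD j []) col "") = true)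
instance (board : List (List String)) (row : Int) (col : Int) : Decidable (Pre_light_up_path board row col) := by
  unfold Pre_light_up_path; infer_instance

def pvWitness_light_up_path : List (List String) × Int × Int :=
  ([[" ", "1", " "], [" ", " ", " "], ["x", " ", " "]], 1, 1)

def Spec_light_up_path (board : List (List String)) (row : Int) (col : Int) (out : List (List String)) : Prop := out = light_up_path_alt board row col
instance (board : List (List String)) (row : Int) (col : Int) (out : List (List String)) : Decidable (Spec_light_up_path board row col out) := by unfold Spec_light_up_path; infer_instance

-- ===== CLAIM (what is proved, stated in full; the proofs are below) =====
def Claim_equal_light_up_path : Prop := ∀ (board : List (List String)) (row : Int) (col : Int), Dom_light_up_path board row col → Pre_light_up_path board row col → Spec_light_up_path board row col (light_up_path board row col)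

-- ===== LEMMAS AND PROOFS =====

-- ---------- generic mark-step / fill machinery (proof-only helpers) ----------

-- one conditional mark of a cell (the body both loops of A and the column fill of B share)
def mstep (b : List (List String)) (p : Int × Int) : List (List String) :=
  if lupGet b p.1 p.2 = " " then lupSet b p.1 p.2 "\"" else b

-- fill a list of positions with conditional marks
def genFill : List (Int × Int) → List (List String) → List (List String)
  | [], b => b
  | p :: ps, b => genFill ps (mstep b p)

-- visited indices of a break-loop: everything up to and including the first stop
def cutI (s : Int → Bool) : List Int → List Int
  | [] => []
  | j :: js => if s j then [j] else j :: cutI s js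

lemma genFill_append (l1 l2 : List (Int × Int)) (b : List (List String)) :
    genFill (l1 ++ l2) b = genFill l2 (genFill l1 b) := by
  induction l1 generalizing b with
  | nil => rfl
  | cons p ps ih => simp [genFill, ih]

lemma cutI_congr {s1 s2 : Int → Bool} : ∀ l : List Int, (∀ j ∈ l, s1 j = s2 j) →
    cutI s1 l = cutI s2 l := by
  intro l
  induction l with
  | nil => intro _; rfl
  | cons j js ih =>
    intro h
    simp only [cutI, h j (by simp)]
    split_ifs with hs
    · rfl
    · rw [ih (fun x hx => h x (by simp [hx]))]

-- ---------- pointwise cell reasoning ----------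

lemma shape_lupSet (b : List (List String)) (r c : Int) (v : String) (h : 0 ≤ r) :
    (lupSet b r c v).map List.length = b.map List.length := by
  unfold lupSet
  rw [PySem.List.pySetD_of_nonneg _ _ h]
  by_cases hlt : r.toNat < b.length
  · rw [List.map_set, PySem.List.length_pySetD,
      PySem.List.pyGetD_eq_getElem _ _ h (by omega), ← List.getElem_map (f := List.length) (h := by simpa using hlt),
      List.set_getElem_self]
  · rw [List.set_eq_of_length_le (by omega)]

lemma length_of_shape {b b' : List (List String)}
    (h : b.map List.length = b'.map List.length) : b.length = b'.length := by
  have := congrArg List.length h; simpa using this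

lemma rowlen_of_shape {b b' : List (List String)} (r : Int) (hr : 0 ≤ r)
    (h : b.map List.length = b'.map List.length) :
    (PySem.List.pyGetD b r []).length = (PySem.List.pyGetD b' r []).length := by
  rw [PySem.List.pyGetD_of_nonneg _ _ hr, PySem.List.pyGetD_of_nonneg _ _ hr]
  have hm : b[r.toNat]?.map List.length = b'[r.toNat]?.map List.length := by
    rw [← List.getElem?_map, ← List.getElem?_map, h]
  cases hb : b[r.toNat]? <;> cases hb2 : b'[r.toNat]? <;>
    simp_all [List.getD_eq_getElem?_getD]

-- a blank cell is an in-range cell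
lemma blank_in_range (b : List (List String)) (r c : Int) (hr : 0 ≤ r) (hc : 0 ≤ c)
    (h : lupGet b r c = " ") :
    r < (b.length : Int) ∧ c < ((PySem.List.pyGetD b r []).length : Int) := by
  unfold lupGet at h
  constructor
  · by_contra hno
    push_neg at hno
    have hrow : PySem.List.pyGetD b r [] = [] := by
      rw [PySem.List.pyGetD_of_nonneg _ _ hr, List.getD_eq_getElem?_getD,
        List.getElem?_eq_none (by omega)]
      rfl
    rw [hrow, PySem.List.pyGetD_of_nonneg _ _ hc] at h
    simp [List.getD] at h
  · by_contra hno
    push_neg at hno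
    rw [PySem.List.pyGetD_of_nonneg _ _ hc, List.getD_eq_getElem?_getD,
      List.getElem?_eq_none (by omega)] at h
    simp at h

lemma get_set_same (b : List (List String)) (r c : Int) (v : String) (hr : 0 ≤ r) (hc : 0 ≤ c)
    (h1 : r < (b.length : Int)) (h2 : c < ((PySem.List.pyGetD b r []).length : Int)) :
    lupGet (lupSet b r c v) r c = v := by
  unfold lupGet lupSet
  rw [PySem.List.pySetD_of_nonneg _ _ hr,
    PySem.List.pyGetD_eq_getElem _ _ hr (by simp; omega),
    List.getElem_set_self (h := by simp; omega),
    PySem.List.pySetD_of_nonneg _ _ hc,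
    PySem.List.pyGetD_eq_getElem _ _ hc (by simp; omega),
    List.getElem_set_self (h := by simp; omega)]

lemma get_set_other (b : List (List String)) (r c r' c' : Int) (v : String)
    (hr : 0 ≤ r) (hc : 0 ≤ c) (hr' : 0 ≤ r') (hc' : 0 ≤ c')
    (hne : ¬ (r' = r ∧ c' = c)) :
    lupGet (lupSet b r c v) r' c' = lupGet b r' c' := by
  unfold lupGet lupSet
  rw [PySem.List.pySetD_of_nonneg _ _ hr, PySem.List.pySetD_of_nonneg _ _ hc]
  by_cases hrr : r' = r
  · subst hrr
    have htn : ¬ c'.toNat = c.toNat := fun hEq => hne ⟨rfl, by omega⟩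
    rw [PySem.List.pyGetD_of_nonneg _ _ hr, PySem.List.pyGetD_of_nonneg _ _ hr]
    by_cases hrl : r'.toNat < b.length
    · rw [List.getD_eq_getElem?_getD, List.getElem?_set_self (h := hrl),
        List.getD_eq_getElem?_getD]
      simp only [Option.getD_some]
      rw [PySem.List.pyGetD_of_nonneg _ _ hc', PySem.List.pyGetD_of_nonneg _ _ hc',
        List.getD_eq_getElem?_getD, List.getElem?_set_ne (by omega),
        ← List.getD_eq_getElem?_getD]
    · rw [List.set_eq_of_length_le (by omega)]
  · have htn : ¬ r'.toNat = r.toNat := fun hEq => hrr (by omega)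
    rw [PySem.List.pyGetD_of_nonneg _ _ hr', PySem.List.pyGetD_of_nonneg _ _ hr',
      List.getD_eq_getElem?_getD, List.getElem?_set_ne (by omega),
      ← List.getD_eq_getElem?_getD]

lemma get_mstep (b : List (List String)) (p : Int × Int) (r c : Int)
    (hp1 : 0 ≤ p.1) (hp2 : 0 ≤ p.2) (hr : 0 ≤ r) (hc : 0 ≤ c) :
    lupGet (mstep b p) r c =
      if (r, c) = p ∧ lupGet b r c = " " then "\"" else lupGet b r c := by
  obtain ⟨p1, p2⟩ := p
  simp only at hp1 hp2 ⊢
  unfold mstep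
  by_cases hbl : lupGet b p1 p2 = " "
  · obtain ⟨hin1, hin2⟩ := blank_in_range b p1 p2 hp1 hp2 hbl
    rw [if_pos hbl]
    by_cases hpq : (r, c) = (p1, p2)
    · rw [Prod.mk.injEq] at hpq
      obtain ⟨rfl, rfl⟩ := hpq
      rw [get_set_same b r c _ hp1 hp2 hin1 hin2, if_pos ⟨rfl, hbl⟩]
    · rw [get_set_other b p1 p2 r c _ hp1 hp2 hr hc
        (fun hh => hpq (by simp [hh.1, hh.2])), if_neg (fun hh => hpq hh.1)]
  · rw [if_neg hbl]
    have hno : ¬ ((r, c) = (p1, p2) ∧ lupGet b r c = " ") := by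
      rintro ⟨hpq, hbl2⟩
      rw [Prod.mk.injEq] at hpq
      exact hbl (hpq.1 ▸ hpq.2 ▸ hbl2)
    rw [if_neg hno]

lemma digit_mstep (b : List (List String)) (p : Int × Int) (r c : Int)
    (hp1 : 0 ≤ p.1) (hp2 : 0 ≤ p.2) (hr : 0 ≤ r) (hc : 0 ≤ c) :
    PySem.Str.strIsdigit (lupGet (mstep b p) r c) = PySem.Str.strIsdigit (lupGet b r c) := by
  rw [get_mstep b p r c hp1 hp2 hr hc]
  split_ifs with h
  · rw [h.2]; decide
  · rfl

lemma shape_mstep (b : List (List String)) (p : Int × Int) (h : 0 ≤ p.1) :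
    (mstep b p).map List.length = b.map List.length := by
  unfold mstep
  split_ifs
  · exact shape_lupSet b p.1 p.2 _ h
  · rfl

lemma shape_genFill (l : List (Int × Int)) (b : List (List String))
    (hl : ∀ p ∈ l, 0 ≤ p.1) :
    (genFill l b).map List.length = b.map List.length := by
  induction l generalizing b with
  | nil => rfl
  | cons p ps ih =>
    simp only [genFill]
    rw [ih _ (fun q hq => hl q (by simp [hq])), shape_mstep b p (hl p (by simp))]

lemma get_genFill (l : List (Int × Int)) (b : List (List String)) (r c : Int)
    (hl : ∀ p ∈ l, 0 ≤ p.1 ∧ 0 ≤ p.2) (hr : 0 ≤ r) (hc : 0 ≤ c) :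
    lupGet (genFill l b) r c =
      if (r, c) ∈ l ∧ lupGet b r c = " " then "\"" else lupGet b r c := by
  induction l generalizing b with
  | nil => simp [genFill]
  | cons p ps ih =>
    simp only [genFill]
    rw [ih _ (fun q hq => hl q (by simp [hq])),
      get_mstep b p r c (hl p (by simp)).1 (hl p (by simp)).2 hr hc]
    by_cases hpq : (r, c) = p <;> by_cases hbl : lupGet b r c = " " <;>
      simp [hpq, hbl, List.mem_cons] <;> intro h <;> simp_all

lemma digit_genFill (l : List (Int × Int)) (b : List (List String)) (r c : Int)
    (hl : ∀ p ∈ l, 0 ≤ p.1 ∧ 0 ≤ p.2) (hr : 0 ≤ r) (hc : 0 ≤ c) :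
    PySem.Str.strIsdigit (lupGet (genFill l b) r c) = PySem.Str.strIsdigit (lupGet b r c) := by
  rw [get_genFill l b r c hl hr hc]
  split_ifs with h
  · rw [h.2]; decide
  · rfl

-- boards with the same shape and the same cells are equal
lemma board_ext {b b' : List (List String)}
    (hsh : b.map List.length = b'.map List.length)
    (hget : ∀ r c : Int, 0 ≤ r → 0 ≤ c → lupGet b r c = lupGet b' r c) : b = b' := by
  have hlen : b.length = b'.length := length_of_shape hsh
  apply List.ext_getElem hlen
  intro r hr1 hr2
  have hrl : b[r].length = b'[r].length := by
    have h1 : (b.map List.length)[r]? = (b'.map List.length)[r]? := by rw [hsh]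
    rwa [List.getElem?_map, List.getElem?_map, List.getElem?_eq_getElem hr1,
      List.getElem?_eq_getElem hr2, Option.map_some, Option.map_some,
      Option.some.injEq] at h1
  apply List.ext_getElem hrl
  intro c hc1 hc2
  have := hget (r : Int) (c : Int) (by positivity) (by positivity)
  unfold lupGet at this
  simp only [PySem.List.pyGetD_natCast] at this
  rwa [List.getD_eq_getElem b [] hr1, List.getD_eq_getElem b' [] hr2,
    List.getD_eq_getElem _ _ hc1, List.getD_eq_getElem _ _ hc2] at this

-- ---------- A's four loops are fills over cut index lists ----------

-- one break-loop over positions g i, marking then stopping on a digit, is a fill of the cut list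
lemma loop_as_fill_gen (g : Int → Int × Int)
    (hg : ∀ i : Int, 0 ≤ i → 0 ≤ (g i).1 ∧ 0 ≤ (g i).2)
    (loop : List Int → List (List String) → List (List String))
    (hcons : ∀ (i : Int) (is : List Int) (b : List (List String)),
      loop (i :: is) b =
        if PySem.Str.strIsdigit (lupGet (mstep b (g i)) (g i).1 (g i).2) then mstep b (g i)
        else loop is (mstep b (g i)))
    (hnil : ∀ b, loop [] b = b) :
    ∀ (l : List Int) (b : List (List String)), (∀ i ∈ l, 0 ≤ i) →
    loop l b =
      genFill ((cutI (fun i => PySem.Str.strIsdigit (lupGet b (g i).1 (g i).2)) l).map g) b := by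
  intro l
  induction l with
  | nil => intro b _; rw [hnil]; rfl
  | cons i is ih =>
    intro b hl
    have hi0 : 0 ≤ i := hl i (by simp)
    rw [hcons i is b,
      digit_mstep b (g i) (g i).1 (g i).2 (hg i hi0).1 (hg i hi0).2 (hg i hi0).1 (hg i hi0).2]
    simp only [cutI]
    by_cases hd : PySem.Str.strIsdigit (lupGet b (g i).1 (g i).2) = true
    · rw [if_pos hd, if_pos hd]; rfl
    · rw [if_neg hd, if_neg hd]
      simp only [List.map_cons]
      show loop is (mstep b (g i)) =
        genFill ((cutI (fun i' => PySem.Str.strIsdigit (lupGet b (g i').1 (g i').2)) is).map g)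
          (mstep b (g i))
      rw [ih (mstep b (g i)) (fun x hx => hl x (by simp [hx]))]
      rw [cutI_congr is (fun x hx =>
        digit_mstep b (g i) (g x).1 (g x).2 (hg i hi0).1 (hg i hi0).2
          (hg x (hl x (by simp [hx]))).1 (hg x (hl x (by simp [hx]))).2)]

lemma right_as_fill (row col : Int) (hrow : 0 ≤ row) (hcol : 0 ≤ col) :
    ∀ (l : List Int) (b : List (List String)), (∀ i ∈ l, 0 ≤ i) →
    lupRight row col l b =
      genFill ((cutI (fun i => PySem.Str.strIsdigit (lupGet b row (col + 1 + i))) l).map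
        (fun i => (row, col + 1 + i))) b := by
  exact loop_as_fill_gen (fun i => (row, col + 1 + i))
    (fun i hi => ⟨hrow, by simp; omega⟩)
    (lupRight row col) (fun i is b => rfl) (fun b => rfl)

lemma left_as_fill (row : Int) (hrow : 0 ≤ row) :
    ∀ (l : List Int) (b : List (List String)), (∀ i ∈ l, 0 ≤ i) →
    lupLeft row l b =
      genFill ((cutI (fun i => PySem.Str.strIsdigit (lupGet b row i)) l).map
        (fun i => (row, i))) b := by
  intro l b hl
  refine loop_as_fill_gen (fun i => (row, i))
    (fun i hi => ⟨hrow, hi⟩) (lupLeft row) (fun i is b => rfl) (fun b => rfl) l b ?_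
  · intro i hi
    exact hl i hi

lemma above_as_fill (col : Int) (hcol : 0 ≤ col) :
    ∀ (l : List Int) (b : List (List String)), (∀ i ∈ l, 0 ≤ i) →
    lupAbove col l b =
      genFill ((cutI (fun i => PySem.Str.strIsdigit (lupGet b i col)) l).map
        (fun i => (i, col))) b := by
  intro l b hl
  exact loop_as_fill_gen (fun i => (i, col))
    (fun i hi => ⟨hi, hcol⟩) (lupAbove col) (fun i is b => rfl) (fun b => rfl) l b hl

lemma below_as_fill (row col : Int) (hrow : 0 ≤ row) (hcol : 0 ≤ col) :
    ∀ (l : List Int) (b : List (List String)), (∀ i ∈ l, 0 ≤ i) →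
    lupBelow row col l b =
      genFill ((cutI (fun i => PySem.Str.strIsdigit (lupGet b (row + i) col)) l).map
        (fun i => (row + i, col))) b := by
  intro l b hl
  exact loop_as_fill_gen (fun i => (row + i, col))
    (fun i hi => ⟨by simp; omega, hcol⟩) (lupBelow row col) (fun i is b => rfl) (fun b => rfl) l b hl

-- ---------- cut membership and bFirst specs ----------

lemma mem_cutI_up (s : Int → Bool) : ∀ (a b j : Int),
    j ∈ cutI s (PySem.List.pyRange a b 1) ↔
      a ≤ j ∧ j < b ∧ ∀ j', a ≤ j' → j' < j → s j' = false := by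
  suffices H : ∀ (k : Nat) (a b j : Int), b - a ≤ (k : Int) →
      (j ∈ cutI s (PySem.List.pyRange a b 1) ↔
        a ≤ j ∧ j < b ∧ ∀ j', a ≤ j' → j' < j → s j' = false) by
    intro a b j
    exact H (b - a).toNat a b j (by omega)
  intro k
  induction k with
  | zero =>
    intro a b j hk
    rw [PySem.List.pyRange_one_eq_nil (by omega)]
    simp [cutI]
    omega
  | succ k ih =>
    intro a b j hk
    by_cases hab : b ≤ a
    · rw [PySem.List.pyRange_one_eq_nil hab]
      simp [cutI]
      omega
    · push_neg at hab
      rw [PySem.List.pyRange_one_cons hab]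
      simp only [cutI]
      by_cases hs : s a = true
      · rw [if_pos hs]
        simp only [List.mem_singleton]
        constructor
        · rintro rfl
          exact ⟨le_rfl, hab, fun j' h1 h2 => absurd h2 (by omega)⟩
        · rintro ⟨h1, h2, h3⟩
          by_contra hne
          have := h3 a le_rfl (by omega)
          rw [hs] at this
          cases this
      · rw [if_neg hs]
        simp only [List.mem_cons]
        rw [ih (a + 1) b j (by omega)]
        constructor
        · rintro (rfl | ⟨h1, h2, h3⟩)
          · exact ⟨le_rfl, hab, fun j' hj1 hj2 => absurd hj2 (by omega)⟩
          · refine ⟨by omega, h2, fun j' hj1 hj2 => ?_⟩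
            by_cases hja : j' = a
            · subst hja; simpa using hs
            · exact h3 j' (by omega) hj2
        · rintro ⟨h1, h2, h3⟩
          by_cases hja : j = a
          · exact Or.inl hja
          · exact Or.inr ⟨by omega, h2, fun j' hj1 hj2 => h3 j' (by omega) hj2⟩

lemma mem_cutI_down (s : Int → Bool) : ∀ (a j : Int),
    j ∈ cutI s (PySem.List.pyRange a (-1) (-1)) ↔
      0 ≤ j ∧ j ≤ a ∧ ∀ j', j < j' → j' ≤ a → s j' = false := by
  suffices H : ∀ (k : Nat) (a j : Int), a < (k : Int) →
      (j ∈ cutI s (PySem.List.pyRange a (-1) (-1)) ↔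
        0 ≤ j ∧ j ≤ a ∧ ∀ j', j < j' → j' ≤ a → s j' = false) by
    intro a j
    exact H (a + 1).toNat a j (by omega)
  intro k
  induction k with
  | zero =>
    intro a j hk
    rw [PySem.List.pyRange_neg_one_eq_nil (by omega)]
    simp [cutI]
    omega
  | succ k ih =>
    intro a j hk
    by_cases ha : a < 0
    · rw [PySem.List.pyRange_neg_one_eq_nil (by omega)]
      simp [cutI]
      omega
    · push_neg at ha
      rw [PySem.List.pyRange_neg_one_cons (by omega)]
      simp only [cutI]
      by_cases hs : s a = true
      · rw [if_pos hs]
        simp only [List.mem_singleton]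
        constructor
        · rintro rfl
          exact ⟨ha, le_rfl, fun j' h1 h2 => absurd h1 (by omega)⟩
        · rintro ⟨h1, h2, h3⟩
          by_contra hne
          have := h3 a (by omega) le_rfl
          rw [hs] at this
          cases this
      · rw [if_neg hs]
        simp only [List.mem_cons]
        rw [ih (a - 1) j (by omega)]
        constructor
        · rintro (rfl | ⟨h1, h2, h3⟩)
          · exact ⟨ha, le_rfl, fun j' hj1 hj2 => absurd hj1 (by omega)⟩
          · refine ⟨h1, by omega, fun j' hj1 hj2 => ?_⟩
            by_cases hja : j' = a
            · subst hja; simpa using hs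
            · exact h3 j' hj1 (by omega)
        · rintro ⟨h1, h2, h3⟩
          by_cases hja : j = a
          · exact Or.inl hja
          · exact Or.inr ⟨h1, by omega, fun j' hj1 hj2 => h3 j' hj1 (by omega)⟩

lemma bFirst_up_spec (s : Int → Bool) : ∀ (a b d : Int),
    (∀ j, a ≤ j → j < bFirst s (PySem.List.pyRange a b 1) d → j < b → s j = false) ∧
    ((a ≤ bFirst s (PySem.List.pyRange a b 1) d ∧ bFirst s (PySem.List.pyRange a b 1) d < b ∧
        s (bFirst s (PySem.List.pyRange a b 1) d) = true) ∨
      (bFirst s (PySem.List.pyRange a b 1) d = d ∧ ∀ j, a ≤ j → j < b → s j = false)) := by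
  suffices H : ∀ (k : Nat) (a b d : Int), b - a ≤ (k : Int) →
      (∀ j, a ≤ j → j < bFirst s (PySem.List.pyRange a b 1) d → j < b → s j = false) ∧
      ((a ≤ bFirst s (PySem.List.pyRange a b 1) d ∧ bFirst s (PySem.List.pyRange a b 1) d < b ∧
          s (bFirst s (PySem.List.pyRange a b 1) d) = true) ∨
        (bFirst s (PySem.List.pyRange a b 1) d = d ∧ ∀ j, a ≤ j → j < b → s j = false)) by
    intro a b d
    exact H (b - a).toNat a b d (by omega)
  intro k
  induction k with
  | zero =>
    intro a b d hk
    rw [PySem.List.pyRange_one_eq_nil (by omega)]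
    exact ⟨fun j h1 h2 h3 => absurd h3 (by omega),
      Or.inr ⟨rfl, fun j h1 h2 => absurd h2 (by omega)⟩⟩
  | succ k ih =>
    intro a b d hk
    by_cases hab : b ≤ a
    · rw [PySem.List.pyRange_one_eq_nil hab]
      exact ⟨fun j h1 h2 h3 => absurd h3 (by omega),
        Or.inr ⟨rfl, fun j h1 h2 => absurd h2 (by omega)⟩⟩
    · push_neg at hab
      rw [PySem.List.pyRange_one_cons hab]
      simp only [bFirst]
      by_cases hs : s a = true
      · rw [if_pos hs]
        exact ⟨fun j h1 h2 h3 => absurd h2 (by omega), Or.inl ⟨le_rfl, hab, hs⟩⟩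
      · rw [if_neg hs]
        obtain ⟨ih1, ih2⟩ := ih (a + 1) b d (by omega)
        refine ⟨fun j h1 h2 h3 => ?_, ?_⟩
        · by_cases hja : j = a
          · subst hja; simpa using hs
          · exact ih1 j (by omega) h2 h3
        · rcases ih2 with ⟨h1, h2, h3⟩ | ⟨h1, h2⟩
          · exact Or.inl ⟨by omega, h2, h3⟩
          · refine Or.inr ⟨h1, fun j hj1 hj2 => ?_⟩
            by_cases hja : j = a
            · subst hja; simpa using hs
            · exact h2 j (by omega) hj2

lemma bFirst_down_spec (s : Int → Bool) : ∀ (a : Int) (d : Int),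
    (∀ j, j > bFirst s (PySem.List.pyRange a (-1) (-1)) d → j ≤ a → 0 ≤ j → s j = false) ∧
    ((0 ≤ bFirst s (PySem.List.pyRange a (-1) (-1)) d ∧ bFirst s (PySem.List.pyRange a (-1) (-1)) d ≤ a ∧
        s (bFirst s (PySem.List.pyRange a (-1) (-1)) d) = true) ∨
      (bFirst s (PySem.List.pyRange a (-1) (-1)) d = d ∧ ∀ j, 0 ≤ j → j ≤ a → s j = false)) := by
  suffices H : ∀ (k : Nat) (a d : Int), a < (k : Int) →
      (∀ j, j > bFirst s (PySem.List.pyRange a (-1) (-1)) d → j ≤ a → 0 ≤ j → s j = false) ∧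
      ((0 ≤ bFirst s (PySem.List.pyRange a (-1) (-1)) d ∧ bFirst s (PySem.List.pyRange a (-1) (-1)) d ≤ a ∧
          s (bFirst s (PySem.List.pyRange a (-1) (-1)) d) = true) ∨
        (bFirst s (PySem.List.pyRange a (-1) (-1)) d = d ∧ ∀ j, 0 ≤ j → j ≤ a → s j = false)) by
    intro a d
    exact H (a + 1).toNat a d (by omega)
  intro k
  induction k with
  | zero =>
    intro a d hk
    rw [PySem.List.pyRange_neg_one_eq_nil (by omega)]
    exact ⟨fun j h1 h2 h3 => absurd h2 (by omega),
      Or.inr ⟨rfl, fun j h1 h2 => absurd h2 (by omega)⟩⟩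
  | succ k ih =>
    intro a d hk
    by_cases ha : a < 0
    · rw [PySem.List.pyRange_neg_one_eq_nil (by omega)]
      exact ⟨fun j h1 h2 h3 => absurd h2 (by omega),
        Or.inr ⟨rfl, fun j h1 h2 => absurd h2 (by omega)⟩⟩
    · push_neg at ha
      rw [PySem.List.pyRange_neg_one_cons (by omega)]
      simp only [bFirst]
      by_cases hs : s a = true
      · rw [if_pos hs]
        exact ⟨fun j h1 h2 h3 => absurd h1 (by omega), Or.inl ⟨ha, le_rfl, hs⟩⟩
      · rw [if_neg hs]
        obtain ⟨ih1, ih2⟩ := ih (a - 1) d (by omega)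
        refine ⟨fun j h1 h2 h3 => ?_, ?_⟩
        · by_cases hja : j = a
          · subst hja; simpa using hs
          · exact ih1 j h1 (by omega) h3
        · rcases ih2 with ⟨h1, h2, h3⟩ | ⟨h1, h2⟩
          · exact Or.inl ⟨h1, by omega, h3⟩
          · refine Or.inr ⟨h1, fun j hj1 hj2 => ?_⟩
            by_cases hja : j = a
            · subst hja; simpa using hs
            · exact h2 j hj1 (by omega)

-- ---------- pointwise form of B's slice assignment ----------

lemma getElem?_patch (xs : List String) (lo hi : Nat) (f : String → String)
    (hlh : lo ≤ hi) (hhn : hi ≤ xs.length) (c : Nat) :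
    (xs.take lo ++ ((xs.drop lo).take (hi - lo)).map f ++ xs.drop hi)[c]? =
      if lo ≤ c ∧ c < hi then xs[c]?.map f else xs[c]? := by
  simp only [List.getElem?_append, List.length_append, List.length_take, List.length_map,
    List.length_drop, List.getElem?_take, List.getElem?_drop, List.getElem?_map]
  split_ifs <;> try omega
  all_goals first
    | rfl
    | (rw [show lo + (c - min lo xs.length) = c from by omega])
    | (rw [show hi + (c - (min lo xs.length + min (hi - lo) (xs.length - lo))) = c from by omega])

lemma get_sliceAssign (b : List (List String)) (row lo hi : Int) (r c : Int)
    (hrow : 0 ≤ row) (hrN : row < (b.length : Int))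
    (hlo : 0 ≤ lo) (hlh : lo ≤ hi) (hhn : hi ≤ ((PySem.List.pyGetD b row []).length : Int))
    (hr : 0 ≤ r) (hc : 0 ≤ c) :
    lupGet (PySem.List.pySetD b row
      ((PySem.List.pyGetD b row []).take lo.toNat ++
        (PySem.List.slice (PySem.List.pyGetD b row []) (some lo) (some hi)).map
          (fun ch => if ch = " " then "\"" else ch) ++
        (PySem.List.pyGetD b row []).drop hi.toNat)) r c =
      if r = row ∧ lo ≤ c ∧ c < hi ∧ lupGet b row c = " " then "\"" else lupGet b r c := by
  unfold lupGet
  rw [PySem.List.slice_toNat _ hlo (le_trans hlo hlh),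
    PySem.List.pySetD_of_nonneg _ _ hrow]
  by_cases hrr : r = row
  · subst hrr
    rw [PySem.List.pyGetD_of_nonneg (b.set r.toNat _) _ hrow, List.getD_eq_getElem?_getD,
      List.getElem?_set_self (h := by omega)]
    simp only [Option.getD_some]
    rw [PySem.List.pyGetD_of_nonneg _ _ hc, List.getD_eq_getElem?_getD,
      getElem?_patch _ _ _ _ (by omega) (by omega) c.toNat,
      PySem.List.pyGetD_of_nonneg (PySem.List.pyGetD b r []) _ hc, List.getD_eq_getElem?_getD]
    cases hopt : (PySem.List.pyGetD b r [])[c.toNat]? with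
    | none =>
      simp only [Option.map_none, ite_self, Option.getD_none]
      rw [if_neg (by rintro ⟨-, -, -, h4⟩; exact absurd h4 (by decide))]
    | some v =>
      by_cases hcond : lo ≤ c ∧ c < hi
      · rw [if_pos (by omega)]
        simp only [Option.map_some, Option.getD_some]
        by_cases hbl : v = " "
        · rw [if_pos hbl, if_pos (show True ∧ lo ≤ c ∧ c < hi ∧ v = " " from
            ⟨trivial, hcond.1, hcond.2, hbl⟩)]
        · rw [if_neg hbl, if_neg (show ¬ (True ∧ lo ≤ c ∧ c < hi ∧ v = " ") from
            fun h => hbl h.2.2.2)]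
      · rw [if_neg (by omega)]
        simp only [Option.getD_some]
        rw [if_neg (fun h => hcond ⟨h.2.1, h.2.2.1⟩)]
  · have htn : ¬ r.toNat = row.toNat := fun hEq => hrr (by omega)
    rw [if_neg (fun h => hrr h.1),
      PySem.List.pyGetD_of_nonneg (b.set row.toNat _) _ hr, List.getD_eq_getElem?_getD,
      List.getElem?_set_ne (by omega), ← List.getD_eq_getElem?_getD,
      ← PySem.List.pyGetD_of_nonneg _ _ hr]

lemma shape_sliceAssign (b : List (List String)) (row lo hi : Int)
    (hrow : 0 ≤ row)
    (hlo : 0 ≤ lo) (hlh : lo ≤ hi) (hhn : hi ≤ ((PySem.List.pyGetD b row []).length : Int)) :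
    (PySem.List.pySetD b row
      ((PySem.List.pyGetD b row []).take lo.toNat ++
        (PySem.List.slice (PySem.List.pyGetD b row []) (some lo) (some hi)).map
          (fun ch => if ch = " " then "\"" else ch) ++
        (PySem.List.pyGetD b row []).drop hi.toNat)).map List.length = b.map List.length := by
  rw [PySem.List.slice_toNat _ hlo (le_trans hlo hlh),
    PySem.List.pySetD_of_nonneg _ _ hrow]
  by_cases hrl : row.toNat < b.length
  · have hcells : PySem.List.pyGetD b row [] = b[row.toNat] :=
      PySem.List.pyGetD_eq_getElem _ _ hrow (by omega)
    have hlen : ((PySem.List.pyGetD b row []).take lo.toNat ++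
        (((PySem.List.pyGetD b row []).drop lo.toNat).take (hi.toNat - lo.toNat)).map
          (fun ch => if ch = " " then "\"" else ch) ++
        (PySem.List.pyGetD b row []).drop hi.toNat).length = b[row.toNat].length := by
      simp only [List.length_append, List.length_take, List.length_map, List.length_drop]
      rw [← hcells]
      omega
    rw [List.map_set, hlen,
      ← List.getElem_map (f := List.length) (h := by simpa using hrl),
      List.set_getElem_self]
  · rw [List.set_eq_of_length_le (by omega)]

-- membership in a cut list as an interval bounded by the first stop (bFirst)
lemma cut_up_mem_iff (s : Int → Bool) (a b c : Int)
    (hc : a ≤ c → c < b → s c = false) :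
    c ∈ cutI s (PySem.List.pyRange a b 1) ↔
      a ≤ c ∧ c < bFirst s (PySem.List.pyRange a b 1) b := by
  obtain ⟨sA, sB⟩ := bFirst_up_spec s a b b
  rw [mem_cutI_up]
  constructor
  · rintro ⟨h1, h2, h3⟩
    refine ⟨h1, ?_⟩
    by_contra hge
    push_neg at hge
    rcases sB with ⟨hA1, hA2, hA3⟩ | ⟨hEq, _⟩
    · rcases lt_or_eq_of_le hge with hlt | hEq2
      · have := h3 _ hA1 hlt
        rw [hA3] at this
        cases this
      · rw [hEq2] at hA3
        rw [hc h1 h2] at hA3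
        cases hA3
    · omega
  · rintro ⟨h1, h2⟩
    have hble : bFirst s (PySem.List.pyRange a b 1) b ≤ b := by
      rcases sB with ⟨_, hA2, _⟩ | ⟨hEq, _⟩ <;> omega
    exact ⟨h1, by omega, fun j' hj1 hj2 => sA j' hj1 (by omega) (by omega)⟩

-- same, with default b - 1 (the form B uses for the downward wall of the column)
lemma cut_up_mem_iff' (s : Int → Bool) (a b c : Int)
    (hc : a ≤ c → c < b → s c = false) :
    c ∈ cutI s (PySem.List.pyRange a b 1) ↔
      a ≤ c ∧ c < bFirst s (PySem.List.pyRange a b 1) (b - 1) + 1 := by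
  obtain ⟨sA, sB⟩ := bFirst_up_spec s a b (b - 1)
  rw [mem_cutI_up]
  constructor
  · rintro ⟨h1, h2, h3⟩
    refine ⟨h1, ?_⟩
    by_contra hge
    push_neg at hge
    rcases sB with ⟨hA1, hA2, hA3⟩ | ⟨hEq, _⟩
    · rcases lt_or_eq_of_le (by omega : bFirst s (PySem.List.pyRange a b 1) (b-1) ≤ c) with hlt | hEq2
      · have := h3 _ hA1 hlt
        rw [hA3] at this
        cases this
      · rw [hEq2] at hA3
        rw [hc h1 h2] at hA3
        cases hA3
    · omega
  · rintro ⟨h1, h2⟩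
    have hble : bFirst s (PySem.List.pyRange a b 1) (b - 1) ≤ b - 1 := by
      rcases sB with ⟨_, hA2, _⟩ | ⟨hEq, _⟩ <;> omega
    exact ⟨h1, by omega, fun j' hj1 hj2 => sA j' hj1 (by omega) (by omega)⟩

lemma cut_down_mem_iff (s : Int → Bool) (a c : Int)
    (hc : 0 ≤ c → c ≤ a → s c = false) :
    c ∈ cutI s (PySem.List.pyRange a (-1) (-1)) ↔
      bFirst s (PySem.List.pyRange a (-1) (-1)) 0 ≤ c ∧ c ≤ a := by
  obtain ⟨sA, sB⟩ := bFirst_down_spec s a 0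
  rw [mem_cutI_down]
  constructor
  · rintro ⟨h1, h2, h3⟩
    refine ⟨?_, h2⟩
    by_contra hlt
    push_neg at hlt
    rcases sB with ⟨hA1, hA2, hA3⟩ | ⟨hEq, _⟩
    · have := h3 _ hlt hA2
      rw [hA3] at this
      cases this
    · omega
  · rintro ⟨h1, h2⟩
    have hble : 0 ≤ bFirst s (PySem.List.pyRange a (-1) (-1)) 0 := by
      rcases sB with ⟨hA1, _, _⟩ | ⟨hEq, _⟩ <;> omega
    exact ⟨by omega, h2, fun j' hj1 hj2 => sA j' (by omega) hj2 (by omega)⟩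

-- ---------- A's result as one fill over four absolute position lists ----------

lemma cutI_map (s : Int → Bool) (f : Int → Int) : ∀ l : List Int,
    cutI s (l.map f) = (cutI (fun i => s (f i)) l).map f := by
  intro l
  induction l with
  | nil => rfl
  | cons j js ih =>
    simp only [List.map_cons, cutI]
    split_ifs with h
    · rfl
    · rw [ih]
      rfl

lemma pyRange_shift (a b : Int) :
    PySem.List.pyRange a b 1 = (PySem.List.pyRange 0 (b - a) 1).map (fun i => a + i) := by
  simp [PySem.List.pyRange_one, List.map_map, Function.comp]

lemma bFirst_congr {s1 s2 : Int → Bool} : ∀ (l : List Int) (d : Int),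
    (∀ j ∈ l, s1 j = s2 j) → bFirst s1 l d = bFirst s2 l d := by
  intro l
  induction l with
  | nil => intro d _; rfl
  | cons j js ih =>
    intro d h
    simp only [bFirst, h j (by simp)]
    split_ifs with hs
    · rfl
    · exact ih d (fun x hx => h x (by simp [hx]))

lemma A_norm (board : List (List String)) (row col : Int)
    (h1 : 0 ≤ row) (h3 : 0 ≤ col)
    (hrhi : row < (board.length : Int))
    (hchi : col < ((PySem.List.pyGetD board row []).length : Int)) :
    light_up_path board row col =
      genFill ((cutI (fun j => PySem.Str.strIsdigit (lupGet board row j)) (PySem.List.pyRange (col + 1) ((PySem.List.pyGetD board row []).length : Int) 1)).map (fun j => ((row : Int), j)) ++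
        (cutI (fun j => PySem.Str.strIsdigit (lupGet board row j)) (PySem.List.pyRange col (-1) (-1))).map (fun j => ((row : Int), j)) ++
        (cutI (fun i => PySem.Str.strIsdigit (lupGet board i col)) (PySem.List.pyRange row (-1) (-1))).map (fun i => (i, (col : Int))) ++
        (cutI (fun i => PySem.Str.strIsdigit (lupGet board i col)) (PySem.List.pyRange row (board.length : Int) 1)).map (fun i => (i, (col : Int)))) board := by
  simp only [light_up_path]
  have e1 : ((PySem.List.slice (PySem.List.pyGetD board row []) (some (col + 1)) none).length : Int)
      = ((PySem.List.pyGetD board row []).length : Int) - (col + 1) := by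
    rw [PySem.List.slice_from _ (by omega : (0:Int) ≤ col + 1), List.length_drop]
    omega
  rw [e1, right_as_fill row col h1 h3 _ board
    (fun i hi => by rw [PySem.List.mem_pyRange_one] at hi; omega)]
  have habs1 : (cutI (fun i => PySem.Str.strIsdigit (lupGet board row (col + 1 + i)))
        (PySem.List.pyRange 0 (((PySem.List.pyGetD board row []).length : Int) - (col + 1)) 1)).map (fun i => (row, col + 1 + i))
      = (cutI (fun j => PySem.Str.strIsdigit (lupGet board row j)) (PySem.List.pyRange (col + 1) ((PySem.List.pyGetD board row []).length : Int) 1)).map (fun j => ((row : Int), j)) := by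
    rw [pyRange_shift (col + 1) ((PySem.List.pyGetD board row []).length : Int), cutI_map, List.map_map]
    rfl
  rw [habs1]
  have hpos1 : ∀ p ∈ (cutI (fun j => PySem.Str.strIsdigit (lupGet board row j)) (PySem.List.pyRange (col + 1) ((PySem.List.pyGetD board row []).length : Int) 1)).map (fun j => ((row : Int), j)), 0 ≤ p.1 ∧ 0 ≤ p.2 := by
    intro p hp
    rw [List.mem_map] at hp
    obtain ⟨j, hj, rfl⟩ := hp
    rw [mem_cutI_up] at hj
    exact ⟨h1, by omega⟩
  have hsh1 : (genFill ((cutI (fun j => PySem.Str.strIsdigit (lupGet board row j)) (PySem.List.pyRange (col + 1) ((PySem.List.pyGetD board row []).length : Int) 1)).map (fun j => ((row : Int), j))) board).map List.length = board.map List.length :=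
    shape_genFill _ _ (fun p hp => (hpos1 p hp).1)
  have hrl1 : ((PySem.List.pyGetD (genFill ((cutI (fun j => PySem.Str.strIsdigit (lupGet board row j)) (PySem.List.pyRange (col + 1) ((PySem.List.pyGetD board row []).length : Int) 1)).map (fun j => ((row : Int), j))) board) row []).length : Int) = ((PySem.List.pyGetD board row []).length : Int) := by
    rw [rowlen_of_shape row h1 hsh1]
  have e2 : ((PySem.List.slice (PySem.List.pyGetD (genFill ((cutI (fun j => PySem.Str.strIsdigit (lupGet board row j)) (PySem.List.pyRange (col + 1) ((PySem.List.pyGetD board row []).length : Int) 1)).map (fun j => ((row : Int), j))) board) row []) none (some col)).length : Int) = col := by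
    rw [PySem.List.slice_to _ h3, List.length_take]
    omega
  rw [e2, left_as_fill row h1 _ (genFill ((cutI (fun j => PySem.Str.strIsdigit (lupGet board row j)) (PySem.List.pyRange (col + 1) ((PySem.List.pyGetD board row []).length : Int) 1)).map (fun j => ((row : Int), j))) board)
    (fun i hi => by rw [PySem.List.mem_pyRange_neg_one] at hi; omega)]
  rw [cutI_congr (s1 := fun i => PySem.Str.strIsdigit (lupGet (genFill ((cutI (fun j => PySem.Str.strIsdigit (lupGet board row j)) (PySem.List.pyRange (col + 1) ((PySem.List.pyGetD board row []).length : Int) 1)).map (fun j => ((row : Int), j))) board) row i))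
    (s2 := fun i => PySem.Str.strIsdigit (lupGet board row i))
    (PySem.List.pyRange col (-1) (-1)) (fun j hj => by
      rw [PySem.List.mem_pyRange_neg_one] at hj
      exact digit_genFill _ board row j hpos1 h1 (by omega)), ← genFill_append]
  have hpos2 : ∀ p ∈ (cutI (fun j => PySem.Str.strIsdigit (lupGet board row j)) (PySem.List.pyRange (col + 1) ((PySem.List.pyGetD board row []).length : Int) 1)).map (fun j => ((row : Int), j)) ++ (cutI (fun j => PySem.Str.strIsdigit (lupGet board row j)) (PySem.List.pyRange col (-1) (-1))).map (fun j => ((row : Int), j)), 0 ≤ p.1 ∧ 0 ≤ p.2 := by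
    intro p hp
    rw [List.mem_append] at hp
    rcases hp with hp | hp
    · exact hpos1 p hp
    · rw [List.mem_map] at hp
      obtain ⟨j, hj, rfl⟩ := hp
      rw [mem_cutI_down] at hj
      exact ⟨h1, by omega⟩
  have hsh2 : (genFill ((cutI (fun j => PySem.Str.strIsdigit (lupGet board row j)) (PySem.List.pyRange (col + 1) ((PySem.List.pyGetD board row []).length : Int) 1)).map (fun j => ((row : Int), j)) ++ (cutI (fun j => PySem.Str.strIsdigit (lupGet board row j)) (PySem.List.pyRange col (-1) (-1))).map (fun j => ((row : Int), j))) board).map List.length = board.map List.length :=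
    shape_genFill _ _ (fun p hp => (hpos2 p hp).1)
  have hlen2 : ((genFill ((cutI (fun j => PySem.Str.strIsdigit (lupGet board row j)) (PySem.List.pyRange (col + 1) ((PySem.List.pyGetD board row []).length : Int) 1)).map (fun j => ((row : Int), j)) ++ (cutI (fun j => PySem.Str.strIsdigit (lupGet board row j)) (PySem.List.pyRange col (-1) (-1))).map (fun j => ((row : Int), j))) board).length : Int) = (board.length : Int) := by
    rw [length_of_shape hsh2]
  have e3 : ((PySem.List.slice (genFill ((cutI (fun j => PySem.Str.strIsdigit (lupGet board row j)) (PySem.List.pyRange (col + 1) ((PySem.List.pyGetD board row []).length : Int) 1)).map (fun j => ((row : Int), j)) ++ (cutI (fun j => PySem.Str.strIsdigit (lupGet board row j)) (PySem.List.pyRange col (-1) (-1))).map (fun j => ((row : Int), j))) board) none (some row)).length : Int) = row := by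
    rw [PySem.List.slice_to _ h1, List.length_take]
    omega
  rw [e3, above_as_fill col h3 _ (genFill ((cutI (fun j => PySem.Str.strIsdigit (lupGet board row j)) (PySem.List.pyRange (col + 1) ((PySem.List.pyGetD board row []).length : Int) 1)).map (fun j => ((row : Int), j)) ++ (cutI (fun j => PySem.Str.strIsdigit (lupGet board row j)) (PySem.List.pyRange col (-1) (-1))).map (fun j => ((row : Int), j))) board)
    (fun i hi => by rw [PySem.List.mem_pyRange_neg_one] at hi; omega)]
  rw [cutI_congr (s1 := fun i => PySem.Str.strIsdigit (lupGet (genFill ((cutI (fun j => PySem.Str.strIsdigit (lupGet board row j)) (PySem.List.pyRange (col + 1) ((PySem.List.pyGetD board row []).length : Int) 1)).map (fun j => ((row : Int), j)) ++ (cutI (fun j => PySem.Str.strIsdigit (lupGet board row j)) (PySem.List.pyRange col (-1) (-1))).map (fun j => ((row : Int), j))) board) i col))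
    (s2 := fun i => PySem.Str.strIsdigit (lupGet board i col))
    (PySem.List.pyRange row (-1) (-1)) (fun j hj => by
      rw [PySem.List.mem_pyRange_neg_one] at hj
      exact digit_genFill _ board j col hpos2 (by omega) h3), ← genFill_append]
  have hpos3 : ∀ p ∈ (cutI (fun j => PySem.Str.strIsdigit (lupGet board row j)) (PySem.List.pyRange (col + 1) ((PySem.List.pyGetD board row []).length : Int) 1)).map (fun j => ((row : Int), j)) ++ (cutI (fun j => PySem.Str.strIsdigit (lupGet board row j)) (PySem.List.pyRange col (-1) (-1))).map (fun j => ((row : Int), j)) ++ (cutI (fun i => PySem.Str.strIsdigit (lupGet board i col)) (PySem.List.pyRange row (-1) (-1))).map (fun i => (i, (col : Int))), 0 ≤ p.1 ∧ 0 ≤ p.2 := by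
    intro p hp
    rw [List.mem_append] at hp
    rcases hp with hp | hp
    · exact hpos2 p hp
    · rw [List.mem_map] at hp
      obtain ⟨j, hj, rfl⟩ := hp
      rw [mem_cutI_down] at hj
      exact ⟨by omega, h3⟩
  have hsh3 : (genFill ((cutI (fun j => PySem.Str.strIsdigit (lupGet board row j)) (PySem.List.pyRange (col + 1) ((PySem.List.pyGetD board row []).length : Int) 1)).map (fun j => ((row : Int), j)) ++ (cutI (fun j => PySem.Str.strIsdigit (lupGet board row j)) (PySem.List.pyRange col (-1) (-1))).map (fun j => ((row : Int), j)) ++ (cutI (fun i => PySem.Str.strIsdigit (lupGet board i col)) (PySem.List.pyRange row (-1) (-1))).map (fun i => (i, (col : Int)))) board).map List.length = board.map List.length :=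
    shape_genFill _ _ (fun p hp => (hpos3 p hp).1)
  have hlen3 : ((genFill ((cutI (fun j => PySem.Str.strIsdigit (lupGet board row j)) (PySem.List.pyRange (col + 1) ((PySem.List.pyGetD board row []).length : Int) 1)).map (fun j => ((row : Int), j)) ++ (cutI (fun j => PySem.Str.strIsdigit (lupGet board row j)) (PySem.List.pyRange col (-1) (-1))).map (fun j => ((row : Int), j)) ++ (cutI (fun i => PySem.Str.strIsdigit (lupGet board i col)) (PySem.List.pyRange row (-1) (-1))).map (fun i => (i, (col : Int)))) board).length : Int) = (board.length : Int) := by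
    rw [length_of_shape hsh3]
  have e4 : ((PySem.List.slice (genFill ((cutI (fun j => PySem.Str.strIsdigit (lupGet board row j)) (PySem.List.pyRange (col + 1) ((PySem.List.pyGetD board row []).length : Int) 1)).map (fun j => ((row : Int), j)) ++ (cutI (fun j => PySem.Str.strIsdigit (lupGet board row j)) (PySem.List.pyRange col (-1) (-1))).map (fun j => ((row : Int), j)) ++ (cutI (fun i => PySem.Str.strIsdigit (lupGet board i col)) (PySem.List.pyRange row (-1) (-1))).map (fun i => (i, (col : Int)))) board) (some row) none).length : Int)
      = (board.length : Int) - row := by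
    rw [PySem.List.slice_from _ h1, List.length_drop]
    omega
  rw [e4, below_as_fill row col h1 h3 _ (genFill ((cutI (fun j => PySem.Str.strIsdigit (lupGet board row j)) (PySem.List.pyRange (col + 1) ((PySem.List.pyGetD board row []).length : Int) 1)).map (fun j => ((row : Int), j)) ++ (cutI (fun j => PySem.Str.strIsdigit (lupGet board row j)) (PySem.List.pyRange col (-1) (-1))).map (fun j => ((row : Int), j)) ++ (cutI (fun i => PySem.Str.strIsdigit (lupGet board i col)) (PySem.List.pyRange row (-1) (-1))).map (fun i => (i, (col : Int)))) board)
    (fun i hi => by rw [PySem.List.mem_pyRange_one] at hi; omega)]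
  rw [cutI_congr (s1 := fun i => PySem.Str.strIsdigit (lupGet (genFill ((cutI (fun j => PySem.Str.strIsdigit (lupGet board row j)) (PySem.List.pyRange (col + 1) ((PySem.List.pyGetD board row []).length : Int) 1)).map (fun j => ((row : Int), j)) ++ (cutI (fun j => PySem.Str.strIsdigit (lupGet board row j)) (PySem.List.pyRange col (-1) (-1))).map (fun j => ((row : Int), j)) ++ (cutI (fun i => PySem.Str.strIsdigit (lupGet board i col)) (PySem.List.pyRange row (-1) (-1))).map (fun i => (i, (col : Int)))) board) (row + i) col))
    (s2 := fun i => PySem.Str.strIsdigit (lupGet board (row + i) col))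
    (PySem.List.pyRange 0 ((board.length : Int) - row) 1) (fun j hj => by
      rw [PySem.List.mem_pyRange_one] at hj
      exact digit_genFill _ board (row + j) col hpos3 (by omega) h3)]
  have habs4 : (cutI (fun i => PySem.Str.strIsdigit (lupGet board (row + i) col))
        (PySem.List.pyRange 0 ((board.length : Int) - row) 1)).map (fun i => (row + i, col))
      = (cutI (fun i => PySem.Str.strIsdigit (lupGet board i col)) (PySem.List.pyRange row (board.length : Int) 1)).map (fun i => (i, (col : Int))) := by
    rw [pyRange_shift row (board.length : Int), cutI_map, List.map_map]
    rfl
  rw [habs4, ← genFill_append]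

-- B's column fold is a fill
lemma fold_as_fill (col : Int) (l : List Int) (b : List (List String)) :
    l.foldl (fun b i => if bGet b i col = " " then bSet b i col "\"" else b) b =
      genFill (l.map (fun i => (i, col))) b := by
  induction l generalizing b with
  | nil => rfl
  | cons i is ih => simp only [List.foldl, List.map, genFill, mstep, ih]; rfl


-- the whole nonnegative-coordinate case: A's four cut fills mark exactly B's two wall-to-wall segments
lemma main_eq (board : List (List String)) (row col : Int)
    (h1 : 0 ≤ row) (h3 : 0 ≤ col)
    (hrhi : row < (board.length : Int))
    (hchi : col < ((PySem.List.pyGetD board row []).length : Int)) :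
    light_up_path board row col = light_up_path_alt board row col := by
  rw [A_norm board row col h1 h3 hrhi hchi]
  simp only [light_up_path_alt]
  rw [if_pos ⟨h1, hrhi, h3, hchi⟩, fold_as_fill]
  have hSB : (fun j => PySem.Str.strIsdigit (PySem.List.pyGetD (PySem.List.pyGetD board row []) j ""))
      = (fun j => PySem.Str.strIsdigit (lupGet board row j)) := rfl
  rw [hSB]
  have hCDpt : ∀ i : Int, 0 ≤ i →
      (decide (col < ((PySem.List.pyGetD board i []).length : Int)) &&
        PySem.Str.strIsdigit (PySem.List.pyGetD (PySem.List.pyGetD board i []) col ""))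
        = PySem.Str.strIsdigit (lupGet board i col) := by
    intro i hi
    unfold lupGet
    by_cases hin : col < ((PySem.List.pyGetD board i []).length : Int)
    · simp [hin]
    · have hz : PySem.List.pyGetD (PySem.List.pyGetD board i []) col "" = "" := by
        rw [PySem.List.pyGetD_of_nonneg _ _ h3, List.getD_eq_getElem?_getD,
          List.getElem?_eq_none (by omega)]
        rfl
      simp [hin, hz]
      decide
  have hUPeq : bFirst (fun i => decide (col < ((PySem.List.pyGetD board i []).length : Int)) &&
        PySem.Str.strIsdigit (PySem.List.pyGetD (PySem.List.pyGetD board i []) col ""))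
        (PySem.List.pyRange row (-1) (-1)) 0
      = bFirst (fun i => PySem.Str.strIsdigit (lupGet board i col))
        (PySem.List.pyRange row (-1) (-1)) 0 :=
    bFirst_congr _ _ (fun j hj => by
      rw [PySem.List.mem_pyRange_neg_one] at hj; exact hCDpt j (by omega))
  have hDNeq : bFirst (fun i => decide (col < ((PySem.List.pyGetD board i []).length : Int)) &&
        PySem.Str.strIsdigit (PySem.List.pyGetD (PySem.List.pyGetD board i []) col ""))
        (PySem.List.pyRange row (board.length : Int) 1) ((board.length : Int) - 1)
      = bFirst (fun i => PySem.Str.strIsdigit (lupGet board i col))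
        (PySem.List.pyRange row (board.length : Int) 1) ((board.length : Int) - 1) :=
    bFirst_congr _ _ (fun j hj => by
      rw [PySem.List.mem_pyRange_one] at hj; exact hCDpt j (by omega))
  rw [hUPeq, hDNeq]
  set DG : Int → Bool := fun j => PySem.Str.strIsdigit (lupGet board row j) with hDGdef
  set CD : Int → Bool := fun i => PySem.Str.strIsdigit (lupGet board i col) with hCDdef
  set L : Int := ((PySem.List.pyGetD board row []).length : Int) with hLdef
  set N : Int := (board.length : Int) with hNdef
  set HI : Int := bFirst DG (PySem.List.pyRange (col + 1) L 1) L with hHIdef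
  set LO : Int := bFirst DG (PySem.List.pyRange col (-1) (-1)) 0 with hLOdef
  set UP : Int := bFirst CD (PySem.List.pyRange row (-1) (-1)) 0 with hUPdef
  set HD : Int := bFirst CD (PySem.List.pyRange row N 1) (N - 1) with hHDdef
  obtain ⟨hiA, hiB⟩ := bFirst_up_spec DG (col + 1) L L
  obtain ⟨loA, loB⟩ := bFirst_down_spec DG col 0
  obtain ⟨upA, upB⟩ := bFirst_down_spec CD row 0
  obtain ⟨dnA, dnB⟩ := bFirst_up_spec CD row N (N - 1)
  rw [← hHIdef] at hiA hiB
  rw [← hLOdef] at loA loB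
  rw [← hUPdef] at upA upB
  rw [← hHDdef] at dnA dnB
  have hHIub : HI ≤ L := by rcases hiB with ⟨_, h, _⟩ | ⟨h, _⟩ <;> omega
  have hHIlb : col + 1 ≤ HI := by rcases hiB with ⟨h, _, _⟩ | ⟨h, _⟩ <;> omega
  have hLOlb : 0 ≤ LO := by rcases loB with ⟨h, _, _⟩ | ⟨h, _⟩ <;> omega
  have hLOub : LO ≤ col := by rcases loB with ⟨_, h, _⟩ | ⟨h, _⟩ <;> omega
  have hUPlb : 0 ≤ UP := by rcases upB with ⟨h, _, _⟩ | ⟨h, _⟩ <;> omega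
  have hUPub : UP ≤ row := by rcases upB with ⟨_, h, _⟩ | ⟨h, _⟩ <;> omega
  have hHDlb : row ≤ HD := by rcases dnB with ⟨h, _, _⟩ | ⟨h, _⟩ <;> omega
  have hHDub : HD ≤ N - 1 := by rcases dnB with ⟨_, h, _⟩ | ⟨h, _⟩ <;> omega
  have posA : ∀ p ∈ (cutI DG (PySem.List.pyRange (col + 1) L 1)).map (fun j => (row, j)) ++
      (cutI DG (PySem.List.pyRange col (-1) (-1))).map (fun j => (row, j)) ++
      (cutI CD (PySem.List.pyRange row (-1) (-1))).map (fun i => (i, col)) ++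
      (cutI CD (PySem.List.pyRange row N 1)).map (fun i => (i, col)), 0 ≤ p.1 ∧ 0 ≤ p.2 := by
    intro p hp
    simp only [List.mem_append] at hp
    rcases hp with ((hp | hp) | hp) | hp <;>
      (rw [List.mem_map] at hp; obtain ⟨j, hj, rfl⟩ := hp) <;>
      first
        | (rw [mem_cutI_up] at hj; constructor <;> simp <;> omega)
        | (rw [mem_cutI_down] at hj; constructor <;> simp <;> omega)
  have pos5 : ∀ p ∈ (PySem.List.pyRange UP (HD + 1) 1).map (fun i => (i, col)), 0 ≤ p.1 ∧ 0 ≤ p.2 := by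
    intro p hp
    rw [List.mem_map] at hp
    obtain ⟨j, hj, rfl⟩ := hp
    rw [PySem.List.mem_pyRange_one] at hj
    exact ⟨by simp; omega, h3⟩
  apply board_ext
  · exact (shape_genFill _ _ (fun p hp => (posA p hp).1)).trans
      ((shape_genFill _ _ (fun p hp => (pos5 p hp).1)).trans
        (shape_sliceAssign board row LO HI h1 hLOlb (by omega) (by omega))).symm
  · intro r c hr hc
    rw [get_genFill _ board r c posA hr hc,
      get_genFill _ _ r c pos5 hr hc,
      get_sliceAssign board row LO HI r c h1 hrhi hLOlb (by omega) (by omega) hr hc]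
    set MA : Prop := (r, c) ∈ (cutI DG (PySem.List.pyRange (col + 1) L 1)).map (fun j => (row, j)) ++
      (cutI DG (PySem.List.pyRange col (-1) (-1))).map (fun j => (row, j)) ++
      (cutI CD (PySem.List.pyRange row (-1) (-1))).map (fun i => (i, col)) ++
      (cutI CD (PySem.List.pyRange row N 1)).map (fun i => (i, col)) with hMA
    set M5 : Prop := (r, c) ∈ (PySem.List.pyRange UP (HD + 1) 1).map (fun i => (i, col)) with hM5
    by_cases hbl : lupGet board r c = " "
    · -- blank cell: compare the two marked regions
      have hm1 : ((r, c) ∈ (cutI DG (PySem.List.pyRange (col + 1) L 1)).map (fun j => (row, j))) ↔ (r = row ∧ col + 1 ≤ c ∧ c < HI) := by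
        constructor
        · intro hp
          rw [List.mem_map] at hp
          obtain ⟨j, hj, hEq⟩ := hp
          rw [Prod.mk.injEq] at hEq
          obtain ⟨hEr, hEc⟩ := hEq
          rw [hEc] at hj
          have hdc : DG c = false := by
            show PySem.Str.strIsdigit (lupGet board row c) = false
            rw [hEr, hbl]; decide
          have hmm := (cut_up_mem_iff DG (col + 1) L c (fun _ _ => hdc)).mp hj
          rw [← hHIdef] at hmm
          exact ⟨hEr.symm, hmm.1, hmm.2⟩
        · rintro ⟨hEr, hcl, hch⟩
          rw [List.mem_map]
          refine ⟨c, ?_, by rw [Prod.mk.injEq]; exact ⟨hEr.symm, rfl⟩⟩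
          have hdc : DG c = false := by
            show PySem.Str.strIsdigit (lupGet board row c) = false
            rw [← hEr, hbl]; decide
          refine (cut_up_mem_iff DG (col + 1) L c (fun _ _ => hdc)).mpr ?_
          rw [← hHIdef]
          exact ⟨hcl, hch⟩
      have hm2 : ((r, c) ∈ (cutI DG (PySem.List.pyRange col (-1) (-1))).map (fun j => (row, j))) ↔ (r = row ∧ LO ≤ c ∧ c ≤ col) := by
        constructor
        · intro hp
          rw [List.mem_map] at hp
          obtain ⟨j, hj, hEq⟩ := hp
          rw [Prod.mk.injEq] at hEq
          obtain ⟨hEr, hEc⟩ := hEq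
          rw [hEc] at hj
          have hdc : DG c = false := by
            show PySem.Str.strIsdigit (lupGet board row c) = false
            rw [hEr, hbl]; decide
          have hmm := (cut_down_mem_iff DG col c (fun _ _ => hdc)).mp hj
          rw [← hLOdef] at hmm
          exact ⟨hEr.symm, hmm.1, hmm.2⟩
        · rintro ⟨hEr, hcl, hch⟩
          rw [List.mem_map]
          refine ⟨c, ?_, by rw [Prod.mk.injEq]; exact ⟨hEr.symm, rfl⟩⟩
          have hdc : DG c = false := by
            show PySem.Str.strIsdigit (lupGet board row c) = false
            rw [← hEr, hbl]; decide
          refine (cut_down_mem_iff DG col c (fun _ _ => hdc)).mpr ?_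
          rw [← hLOdef]
          exact ⟨hcl, hch⟩
      have hm3 : ((r, c) ∈ (cutI CD (PySem.List.pyRange row (-1) (-1))).map (fun i => (i, col))) ↔ (c = col ∧ UP ≤ r ∧ r ≤ row) := by
        constructor
        · intro hp
          rw [List.mem_map] at hp
          obtain ⟨j, hj, hEq⟩ := hp
          rw [Prod.mk.injEq] at hEq
          obtain ⟨hEr, hEc⟩ := hEq
          rw [hEr] at hj
          have hdc : CD r = false := by
            show PySem.Str.strIsdigit (lupGet board r col) = false
            rw [hEc, hbl]; decide
          have hmm := (cut_down_mem_iff CD row r (fun _ _ => hdc)).mp hj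
          rw [← hUPdef] at hmm
          exact ⟨hEc.symm, hmm.1, hmm.2⟩
        · rintro ⟨hEc, hcl, hch⟩
          rw [List.mem_map]
          refine ⟨r, ?_, by rw [Prod.mk.injEq]; exact ⟨rfl, hEc.symm⟩⟩
          have hdc : CD r = false := by
            show PySem.Str.strIsdigit (lupGet board r col) = false
            rw [← hEc, hbl]; decide
          refine (cut_down_mem_iff CD row r (fun _ _ => hdc)).mpr ?_
          rw [← hUPdef]
          exact ⟨hcl, hch⟩
      have hm4 : ((r, c) ∈ (cutI CD (PySem.List.pyRange row N 1)).map (fun i => (i, col))) ↔ (c = col ∧ row ≤ r ∧ r < HD + 1) := by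
        constructor
        · intro hp
          rw [List.mem_map] at hp
          obtain ⟨j, hj, hEq⟩ := hp
          rw [Prod.mk.injEq] at hEq
          obtain ⟨hEr, hEc⟩ := hEq
          rw [hEr] at hj
          have hdc : CD r = false := by
            show PySem.Str.strIsdigit (lupGet board r col) = false
            rw [hEc, hbl]; decide
          have hmm := (cut_up_mem_iff' CD row N r (fun _ _ => hdc)).mp hj
          rw [← hHDdef] at hmm
          exact ⟨hEc.symm, hmm.1, hmm.2⟩
        · rintro ⟨hEc, hcl, hch⟩
          rw [List.mem_map]
          refine ⟨r, ?_, by rw [Prod.mk.injEq]; exact ⟨rfl, hEc.symm⟩⟩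
          have hdc : CD r = false := by
            show PySem.Str.strIsdigit (lupGet board r col) = false
            rw [← hEc, hbl]; decide
          refine (cut_up_mem_iff' CD row N r (fun _ _ => hdc)).mpr ?_
          rw [← hHDdef]
          exact ⟨hcl, hch⟩
      have hm5 : M5 ↔ (c = col ∧ UP ≤ r ∧ r < HD + 1) := by
        rw [hM5]
        constructor
        · intro hp
          rw [List.mem_map] at hp
          obtain ⟨j, hj, hEq⟩ := hp
          rw [Prod.mk.injEq] at hEq
          obtain ⟨hEr, hEc⟩ := hEq
          rw [hEr] at hj
          rw [PySem.List.mem_pyRange_one] at hj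
          exact ⟨hEc.symm, hj.1, hj.2⟩
        · rintro ⟨hEc, hu, hd⟩
          rw [List.mem_map]
          exact ⟨r, by rw [PySem.List.mem_pyRange_one]; exact ⟨hu, hd⟩,
            by rw [Prod.mk.injEq]; exact ⟨rfl, hEc.symm⟩⟩
      have hiff : MA ↔ ((r = row ∧ LO ≤ c ∧ c < HI) ∨ (c = col ∧ UP ≤ r ∧ r < HD + 1)) := by
        rw [hMA]
        simp only [List.mem_append]
        rw [hm1, hm2, hm3, hm4]
        constructor
        · rintro (((h | h) | h) | h)
          · exact Or.inl ⟨h.1, by omega, h.2.2⟩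
          · exact Or.inl ⟨h.1, h.2.1, by omega⟩
          · exact Or.inr ⟨h.1, h.2.1, by omega⟩
          · exact Or.inr ⟨h.1, by omega, h.2.2⟩
        · rintro (⟨hEr, hcl, hch⟩ | ⟨hEc, hu, hd⟩)
          · by_cases hcc : c ≤ col
            · exact Or.inl (Or.inl (Or.inr ⟨hEr, hcl, hcc⟩))
            · exact Or.inl (Or.inl (Or.inl ⟨hEr, by omega, hch⟩))
          · by_cases hrr2 : r ≤ row
            · exact Or.inl (Or.inr ⟨hEc, hu, hrr2⟩)
            · exact Or.inr ⟨hEc, by omega, hd⟩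
      by_cases hmem : MA
      · rw [if_pos (show MA ∧ lupGet board r c = " " from ⟨hmem, hbl⟩)]
        rcases hiff.mp hmem with ⟨hEr, hcl, hch⟩ | ⟨hEc, hu, hd⟩
        · have hblr : lupGet board row c = " " := by rw [← hEr]; exact hbl
          rw [if_pos (show r = row ∧ LO ≤ c ∧ c < HI ∧ lupGet board row c = " " from
            ⟨hEr, hcl, hch, hblr⟩)]
          rw [if_neg (show ¬ (M5 ∧ ("\"" : String) = " ") from fun h => absurd h.2 (by decide))]
        · have hP5m : M5 := hm5.mpr ⟨hEc, hu, hd⟩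
          by_cases hcnd : r = row ∧ LO ≤ c ∧ c < HI ∧ lupGet board row c = " "
          · rw [if_pos hcnd]
            rw [if_neg (show ¬ (M5 ∧ ("\"" : String) = " ") from fun h => absurd h.2 (by decide))]
          · rw [if_neg hcnd]
            rw [if_pos (show M5 ∧ lupGet board r c = " " from ⟨hP5m, hbl⟩)]
      · rw [if_neg (show ¬ (MA ∧ lupGet board r c = " ") from fun h => hmem h.1)]
        have hc2 : ¬ (r = row ∧ LO ≤ c ∧ c < HI ∧ lupGet board row c = " ") :=
          fun h => hmem (hiff.mpr (Or.inl ⟨h.1, h.2.1, h.2.2.1⟩))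
        rw [if_neg hc2]
        rw [if_neg (show ¬ (M5 ∧ lupGet board r c = " ") from
          fun h => hmem (hiff.mpr (Or.inr (hm5.mp h.1))))]
    · -- non-blank cell: nobody touches it
      rw [if_neg (show ¬ (MA ∧ lupGet board r c = " ") from fun h => hbl h.2)]
      have hc2 : ¬ (r = row ∧ LO ≤ c ∧ c < HI ∧ lupGet board row c = " ") :=
        fun h => hbl (by rw [h.1]; exact h.2.2.2)
      rw [if_neg hc2]
      rw [if_neg (show ¬ (M5 ∧ lupGet board r c = " ") from fun h => hbl h.2)]

-- ===== VERDICT (by name: the statement is the Claim_ definition above) =====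
theorem light_up_path_spec : Claim_equal_light_up_path := by
  intro board row col _ hpre
  obtain ⟨h1, hrhi, h3, hchi, -, -⟩ := hpre
  exact main_eq board row col h1 h3 hrhi hchi
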